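-- pv_equiv track=rewrite | github.com/iwataka/google-code-jam | 2018/round1a/waffle_choppers/main.py | solve
-- ===== SOURCE A (Python) =====
-- def solve(waffle_grid, h, v):
--     n_pieces = (h + 1) * (v + 1)
--     n_choco_chips = sum([sum(x) for x in waffle_grid])
--     if n_choco_chips % n_pieces != 0:
--         return False
--     # Horiazontal
--     n_each_pieces_h = n_choco_chips // (h + 1)
--     sum_n_pieces_h = 0
--     cuts_h = [-1]
--     for i, row in enumerate(waffle_grid):
--         sum_n_pieces_h += sum(row)
--         if sum_n_pieces_h == n_each_pieces_h:
--             sum_n_pieces_h = 0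
--             cuts_h.append(i)
--         elif sum_n_pieces_h < n_each_pieces_h:
--             continue
--         else:
--             return False
--
--     cutted_waffle_grid = []
--     for j in range(0, len(cuts_h) - 1):
--         top = cuts_h[j] + 1
--         bottom = cuts_h[j + 1]
--         cutted_waffle_grid.append(waffle_grid[top:bottom + 1])
--
--     n_each_pieces = n_choco_chips // n_pieces
--     n_cols = len(waffle_grid[0])
--     left = 0
--     for i in range(0, n_cols):
--         sums_choco_chips = []
--         for cutted_waffle_row in cutted_waffle_grid:
--             sums_choco_chips.append(
--                 sum([sum(x[left:i + 1]) for x in cutted_waffle_row]))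
--         cutted_properly = True
--         max_chips = max(sums_choco_chips)
--         for sum_chips in sums_choco_chips:
--             if sum_chips != n_each_pieces:
--                 cutted_properly = False
--                 break
--         if cutted_properly:
--             left = i + 1
--             continue
--         elif max_chips <= n_each_pieces:
--             continue
--         else:
--             return False
--
--     return True
-- ===== SOURCE B (Python) =====
-- def solve(waffle_grid, h, v):
--     n_pieces = (h + 1) * (v + 1)
--     total = sum(sum(row) for row in waffle_grid)
--     if total % n_pieces != 0:
--         return False
--     band_target = total // (h + 1)
--     # Horizontal pass: group the rows greedily into bands of chip-sum band_target.
--     bands = []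
--     cur = []
--     acc = 0
--     for row in waffle_grid:
--         acc += sum(row)
--         cur = cur + [row]
--         if acc == band_target:
--             bands.append(cur)
--             cur = []
--             acc = 0
--         elif acc > band_target:
--             return False
--     # Vertical pass: one running chip count per band, updated incrementally
--     # column by column (no re-summing of column ranges).
--     n_each = total // n_pieces
--     n_cols = len(waffle_grid[0])
--     run = [0] * len(bands)
--     for i in range(n_cols):
--         run = [r + sum(row[i] if i < len(row) else 0 for row in band)
--                for r, band in zip(run, bands)]
--         if all(r == n_each for r in run):
--             run = [0] * len(bands)
--         elif any(r > n_each for r in run):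
--             return False
--     return True
-- ===== Notes on version B (the rewrite author's own statement) =====
-- stated objective: alternative
-- what changed: B groups the rows themselves into bands incrementally (no cut-index list and no re-slicing of the grid) and sweeps the columns once, keeping one running chip count per band updated by adding each band's current column, instead of A's re-summing of every row slice [left:i+1] for every column and its max() scan; on the generated inputs the measured times are equal. Pre_ excludes exactly the inputs on which A raises (h=-1 or v=-1, the empty grid, and grids where the horizontal loop finds no cut so max([]) raises ValueError); on those last inputs B naturally returns True.
import Mathlib
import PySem

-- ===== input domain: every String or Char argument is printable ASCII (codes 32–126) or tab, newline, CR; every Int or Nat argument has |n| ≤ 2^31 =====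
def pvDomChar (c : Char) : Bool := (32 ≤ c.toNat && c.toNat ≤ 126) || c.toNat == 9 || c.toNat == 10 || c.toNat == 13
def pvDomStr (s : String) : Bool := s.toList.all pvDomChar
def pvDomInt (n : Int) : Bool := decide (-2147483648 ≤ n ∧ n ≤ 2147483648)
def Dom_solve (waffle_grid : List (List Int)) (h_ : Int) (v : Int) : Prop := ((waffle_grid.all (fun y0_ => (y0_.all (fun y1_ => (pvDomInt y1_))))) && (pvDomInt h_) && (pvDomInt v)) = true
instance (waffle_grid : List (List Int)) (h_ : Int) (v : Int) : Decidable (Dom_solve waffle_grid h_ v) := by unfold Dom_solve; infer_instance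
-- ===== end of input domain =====

-- B replaces A's cut-index list + grid re-slicing and its per-column re-summing of every
-- row range [left:i+1] by incremental row grouping and one running chip count per band
-- (objective: alternative — a different traversal maintaining running sums).

-- ===== PORT A =====
-- A's `for i, row in enumerate(waffle_grid)` loop with early `return False`:
-- recursion with an explicit index i; `none` = the early False return.
def solveHCutsA (rows : List (List Int)) (i : Int) (acc : Int) (target : Int)
    (cuts : List Int) : Option (List Int) :=
  match rows with
  | [] => some cuts
  | row :: rest =>
    let acc' := acc + row.sum
    if acc' = target then solveHCutsA rest (i + 1) 0 target (cuts ++ [i])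
    else if acc' < target then solveHCutsA rest (i + 1) acc' target cuts
    else none

-- A's `for j in range(0, len(cuts_h) - 1)` loop building cutted_waffle_grid.
def solveBandsA (g : List (List Int)) (cuts : List Int) : List (List (List Int)) :=
  (PySem.List.pyRange 0 ((cuts.length : Int) - 1) 1).map (fun j =>
    let top := PySem.List.pyGetD cuts j 0 + 1
    let bottom := PySem.List.pyGetD cuts (j + 1) 0
    PySem.List.slice g (some top) (some (bottom + 1)))

-- A's `for i in range(0, n_cols)` loop with early `return False`.
-- `max(sums_choco_chips)` raises ValueError on an empty list: excluded by Pre_ ( `.getD 0` is never the decisive value there ).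
def solveVA (bands : List (List (List Int))) (cols : List Int) (left : Int) (n_each : Int) : Bool :=
  match cols with
  | [] => true
  | i :: rest =>
    let sums := bands.map (fun band =>
      (band.map (fun x => (PySem.List.slice x (some left) (some (i + 1))).sum)).sum)
    let cutted_properly := sums.all (fun s => s == n_each)
    let max_chips := (PySem.List.max? sums (fun y => y)).getD 0
    if cutted_properly then solveVA bands rest (i + 1) n_each
    else if max_chips ≤ n_each then solveVA bands rest left n_each
    else false

def solve (waffle_grid : List (List Int)) (h_ : Int) (v : Int) : Bool :=
  let n_pieces := (h_ + 1) * (v + 1)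
  let n_choco_chips := (waffle_grid.map (fun x => x.sum)).sum
  -- `% 0` raises ZeroDivisionError in Python: n_pieces = 0 is excluded by Pre_
  if PySem.Int.mod n_choco_chips n_pieces ≠ 0 then false
  else
    let n_each_pieces_h := PySem.Int.floordiv n_choco_chips (h_ + 1)
    match solveHCutsA waffle_grid 0 0 n_each_pieces_h [-1] with
    | none => false
    | some cuts_h =>
      let n_each := PySem.Int.floordiv n_choco_chips n_pieces
      -- waffle_grid[0] raises IndexError on []: excluded by Pre_
      let n_cols := ((PySem.List.pyGetD waffle_grid 0 []).length : Int)
      solveVA (solveBandsA waffle_grid cuts_h) (PySem.List.pyRange 0 n_cols 1) 0 n_each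

-- ===== PORT B =====
-- B's row loop: greedily groups the rows themselves into bands (no index list, no re-slicing).
def solveHAlt (rows : List (List Int)) (acc : Int) (target : Int)
    (cur : List (List Int)) (bands : List (List (List Int))) : Option (List (List (List Int))) :=
  match rows with
  | [] => some bands
  | row :: rest =>
    let acc' := acc + row.sum
    let cur' := cur ++ [row]
    if acc' = target then solveHAlt rest 0 target [] (bands ++ [cur'])
    else if acc' > target then none
    else solveHAlt rest acc' target cur' bands

-- B's column loop: one running count per band, updated by adding column i of that band
-- (`row[i] if i < len(row) else 0` = pyGetD with default 0).
def solveVAlt (bands : List (List (List Int))) (cols : List Int) (run : List Int) (n_each : Int) : Bool :=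
  match cols with
  | [] => true
  | i :: rest =>
    let run' := (run.zip bands).map (fun p =>
      p.1 + (p.2.map (fun row => PySem.List.pyGetD row i 0)).sum)
    if run'.all (fun r => r == n_each) then
      solveVAlt bands rest (List.replicate bands.length 0) n_each
    else if run'.any (fun r => n_each < r) then false
    else solveVAlt bands rest run' n_each

def solve_alt (waffle_grid : List (List Int)) (h_ : Int) (v : Int) : Bool :=
  let n_pieces := (h_ + 1) * (v + 1)
  let total := (waffle_grid.map (fun row => row.sum)).sum
  if PySem.Int.mod total n_pieces ≠ 0 then false
  else
    let band_target := PySem.Int.floordiv total (h_ + 1)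
    match solveHAlt waffle_grid 0 band_target [] [] with
    | none => false
    | some bands =>
      let n_each := PySem.Int.floordiv total n_pieces
      let n_cols := ((PySem.List.pyGetD waffle_grid 0 []).length : Int)
      solveVAlt bands (PySem.List.pyRange 0 n_cols 1) (List.replicate bands.length 0) n_each

-- ===== PRECONDITION & SPEC =====
-- The horizontal loop of A finds no cut at all (so A's later `max([])` raises ValueError)
-- exactly when the divisibility test passes, the first row is nonempty, and every prefix
-- sum of the row sums stays strictly below the per-strip target.
def NoCut_solve (waffle_grid : List (List Int)) (h_ : Int) (v : Int) : Prop :=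
  PySem.Int.mod ((waffle_grid.map List.sum).sum) ((h_ + 1) * (v + 1)) = 0 ∧
  0 < (waffle_grid.headD []).length ∧
  ∀ k : Nat, k < waffle_grid.length →
    ((waffle_grid.take (k + 1)).map List.sum).sum <
      PySem.Int.floordiv ((waffle_grid.map List.sum).sum) (h_ + 1)
-- Pre_ excludes exactly the inputs on which Python A raises: h = -1 or v = -1
-- (ZeroDivisionError in `% n_pieces`), an empty grid (IndexError on waffle_grid[0]),
-- and the NoCut_solve inputs (ValueError from max([])); A returns on everything else.
def Pre_solve (waffle_grid : List (List Int)) (h_ : Int) (v : Int) : Prop :=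
  h_ ≠ -1 ∧ v ≠ -1 ∧ waffle_grid ≠ [] ∧ ¬ NoCut_solve waffle_grid h_ v
instance (waffle_grid : List (List Int)) (h_ : Int) (v : Int) : Decidable (Pre_solve waffle_grid h_ v) := by
  unfold Pre_solve NoCut_solve; infer_instance

def pvWitness_solve : List (List Int) × Int × Int := ([[1, 1], [1, 1]], 1, 1)

def Spec_solve (waffle_grid : List (List Int)) (h_ : Int) (v : Int) (out : Bool) : Prop := out = solve_alt waffle_grid h_ v
instance (waffle_grid : List (List Int)) (h_ : Int) (v : Int) (out : Bool) : Decidable (Spec_solve waffle_grid h_ v out) := by unfold Spec_solve; infer_instance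

-- ===== CLAIM (what is proved, stated in full; the proofs are below) =====
def Claim_equal_solve : Prop := ∀ (waffle_grid : List (List Int)) (h_ : Int) (v : Int), Dom_solve waffle_grid h_ v → Pre_solve waffle_grid h_ v → Spec_solve waffle_grid h_ v (solve waffle_grid h_ v)

-- ===== LEMMAS AND PROOFS =====

-- Structural (adjacent-pairs) reading of A's band-slicing loop.
def chop (g : List (List Int)) : List Int → List (List (List Int))
  | [] => []
  | [_] => []
  | a :: b :: rest =>
    PySem.List.slice g (some (a + 1)) (some (b + 1)) :: chop g (b :: rest)

-- The cut-index list A carries, expressed as a function of B's bands.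
def cutsAux (c : Int) : List (List (List Int)) → List Int
  | [] => [c]
  | b :: bs => c :: cutsAux (c + b.length) bs

theorem solveBandsA_eq_chop (g : List (List Int)) (cuts : List Int) :
    solveBandsA g cuts = chop g cuts := by
  induction cuts with
  | nil =>
    simp only [solveBandsA, chop, List.length_nil]
    rw [PySem.List.pyRange_one_eq_nil (by omega)]
    rfl
  | cons a tail ih =>
    cases tail with
    | nil =>
      simp only [solveBandsA, chop, List.length_cons, List.length_nil]
      rw [show ((0 + 1 : Nat) : Int) - 1 = 0 from by push_cast; try ring,
        PySem.List.pyRange_one_eq_nil le_rfl]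
      rfl
    | cons b rest =>
      simp only [solveBandsA, List.length_cons] at ih ⊢
      rw [show ((rest.length + 1 + 1 : Nat) : Int) - 1 = ((rest.length + 1 : Nat) : Int) from by
          push_cast; try ring,
        PySem.List.pyRange_zero_natCast, List.map_map, List.range_succ_eq_map, List.map_cons]
      rw [show ((rest.length + 1 : Nat) : Int) - 1 = ((rest.length : Nat) : Int) from by
          push_cast; try ring,
        PySem.List.pyRange_zero_natCast, List.map_map] at ih
      rw [chop, ← ih, List.map_map]
      congr 1
      · show PySem.List.slice g (some (PySem.List.pyGetD (a :: b :: rest) ((0 : Nat) : Int) 0 + 1))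
            (some (PySem.List.pyGetD (a :: b :: rest) (((0 : Nat) : Int) + 1) 0 + 1)) = _
        rw [show (((0 : Nat) : Int) + 1) = ((1 : Nat) : Int) from by push_cast; try ring]
        rw [PySem.List.pyGetD_natCast, PySem.List.pyGetD_natCast]
        rfl
      · refine List.map_congr_left fun k hk => ?_
        show PySem.List.slice g (some (PySem.List.pyGetD (a :: b :: rest) ((k.succ : Nat) : Int) 0 + 1))
            (some (PySem.List.pyGetD (a :: b :: rest) (((k.succ : Nat) : Int) + 1) 0 + 1)) = _
        rw [show (((k.succ : Nat) : Int) + 1) = ((k + 2 : Nat) : Int) from by push_cast; try ring]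
        rw [PySem.List.pyGetD_natCast, PySem.List.pyGetD_natCast]
        show _ = PySem.List.slice g (some (PySem.List.pyGetD (b :: rest) ((k : Nat) : Int) 0 + 1))
            (some (PySem.List.pyGetD (b :: rest) (((k : Nat) : Int) + 1) 0 + 1))
        rw [show (((k : Nat) : Int) + 1) = ((k + 1 : Nat) : Int) from by push_cast; try ring]
        rw [PySem.List.pyGetD_natCast, PySem.List.pyGetD_natCast]
        rfl

theorem cutsAux_append (bs : List (List (List Int))) (c : Int) (b : List (List Int)) :
    cutsAux c (bs ++ [b]) = cutsAux c bs ++ [c + (bs.flatten.length : Int) + (b.length : Int)] := by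
  induction bs generalizing c with
  | nil => simp [cutsAux]
  | cons b0 bs ih =>
    simp only [List.cons_append, cutsAux, ih, List.flatten_cons, List.length_append]
    congr 3
    push_cast
    ring

theorem chop_cutsAux (bs : List (List (List Int))) (pre rest : List (List Int)) :
    chop (pre ++ (bs.flatten ++ rest)) (cutsAux ((pre.length : Int) - 1) bs) = bs := by
  induction bs generalizing pre rest with
  | nil => simp [cutsAux, chop]
  | cons b bs ih =>
    have hhead : ∃ r, cutsAux ((pre.length : Int) - 1 + (b.length : Int)) bs
        = ((pre.length : Int) - 1 + (b.length : Int)) :: r := by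
      cases bs <;> exact ⟨_, rfl⟩
    obtain ⟨r, hr⟩ := hhead
    rw [cutsAux, hr, chop, ← hr]
    congr 1
    · -- the slice is exactly b
      rw [show (pre.length : Int) - 1 + 1 = ((pre.length : Nat) : Int) from by ring,
        show (pre.length : Int) - 1 + (b.length : Int) + 1 = ((pre.length + b.length : Nat) : Int) from by
          push_cast; try ring,
        PySem.List.slice_natCast]
      rw [show pre ++ ((b :: bs).flatten ++ rest) = pre ++ (b ++ (bs.flatten ++ rest)) from by
        simp [List.flatten_cons, List.append_assoc]]
      rw [List.drop_left, show pre.length + b.length - pre.length = b.length from by omega,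
        List.take_left]
    · have := ih (pre ++ b) rest
      rw [show pre ++ ((b :: bs).flatten ++ rest) = (pre ++ b) ++ (bs.flatten ++ rest) from by
        simp [List.flatten_cons, List.append_assoc]]
      rw [show (pre.length : Int) - 1 + (b.length : Int) = ((pre ++ b).length : Int) - 1 from by
        simp [List.length_append]; ring]
      exact this

-- Horizontal simulation: A's cut-index loop, followed by the slicing, computes B's bands.
theorem hsim (rows : List (List Int)) : ∀ (pre cur : List (List Int)) (acc target : Int)
    (bands : List (List (List Int))), pre = bands.flatten ++ cur →
    Option.map (solveBandsA (pre ++ rows))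
        (solveHCutsA rows (pre.length : Int) acc target (cutsAux (-1) bands))
      = solveHAlt rows acc target cur bands := by
  induction rows with
  | nil =>
    intro pre cur acc target bands hpre
    simp only [solveHCutsA, solveHAlt, Option.map_some, List.append_nil]
    rw [solveBandsA_eq_chop]
    have := chop_cutsAux bands [] cur
    simp only [List.nil_append, List.length_nil] at this
    rw [show ((0 : Nat) : Int) - 1 = -1 from by simp] at this
    rw [hpre, this]
  | cons row rs ih =>
    intro pre cur acc target bands hpre
    simp only [solveHCutsA, solveHAlt]
    by_cases heq : acc + row.sum = target
    · rw [if_pos heq, if_pos heq]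
      have hc : cutsAux (-1) bands ++ [(pre.length : Int)]
          = cutsAux (-1) (bands ++ [cur ++ [row]]) := by
        rw [cutsAux_append]
        have : pre.length = bands.flatten.length + cur.length := by
          rw [hpre, List.length_append]
        simp only [List.length_append, List.length_cons, List.length_nil]
        congr 1
        congr 1
        push_cast
        omega
      have hg : pre ++ row :: rs = (pre ++ [row]) ++ rs := by simp
      have hi : (pre.length : Int) + 1 = (((pre ++ [row]).length : Nat) : Int) := by
        simp [List.length_append]
      rw [hc, hg, hi]
      exact ih (pre ++ [row]) [] 0 target (bands ++ [cur ++ [row]])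
        (by simp [hpre, List.append_assoc])
    · rw [if_neg heq, if_neg heq]
      by_cases hlt : acc + row.sum < target
      · rw [if_pos hlt, if_neg (by omega : ¬ acc + row.sum > target)]
        have hg : pre ++ row :: rs = (pre ++ [row]) ++ rs := by simp
        have hi : (pre.length : Int) + 1 = (((pre ++ [row]).length : Nat) : Int) := by
          simp [List.length_append]
        rw [hg, hi]
        exact ih (pre ++ [row]) (cur ++ [row]) (acc + row.sum) target bands
          (by simp [hpre, List.append_assoc])
      · rw [if_neg hlt, if_pos (by omega : acc + row.sum > target)]
        rfl

-- One-column increment of a row's range sum.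
theorem rowIncr (x : List Int) (left i : Int) (hl : 0 ≤ left) (hi : left ≤ i) :
    (PySem.List.slice x (some left) (some (i + 1))).sum
      = (PySem.List.slice x (some left) (some i)).sum + PySem.List.pyGetD x i 0 := by
  have h0i : 0 ≤ i := le_trans hl hi
  lift i to Nat using h0i with k
  lift left to Nat using hl with l
  rw [PySem.List.slice_toNat x (by omega) (by omega), PySem.List.slice_toNat x (by omega) (by omega),
    PySem.List.pyGetD_natCast]
  have h1 : ((k : Int) + 1).toNat = k + 1 := by omega
  have h2 : ((k : Int)).toNat = k := by omega
  have h3 : ((l : Int)).toNat = l := by omega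
  rw [h1, h2, h3]
  have h4 : k + 1 - l = (k - l) + 1 := by omega
  rw [h4, List.take_add_one, List.sum_append, List.getElem?_drop]
  have h5 : l + (k - l) = k := by omega
  rw [h5]
  rcases h : x[k]? with _ | a
  · simp [List.getD_eq_getElem?_getD, h]
  · simp [List.getD_eq_getElem?_getD, h]

theorem zip_run (bands : List (List (List Int))) (f : List (List Int) → Int) (g : List (List Int) → Int) :
    ((bands.map f).zip bands).map (fun p => p.1 + g p.2) = bands.map (fun b => f b + g b) := by
  induction bands with
  | nil => rfl
  | cons b bs ih => simp [ih]

-- Vertical simulation: B's running counts equal A's re-summed column ranges.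
theorem vsim (n : Nat) (bands : List (List (List Int))) (n_each : Int) :
    ∀ (i left m : Int) (run : List Int), (m - i).toNat = n → 0 ≤ left → left ≤ i →
    run = bands.map (fun band =>
      (band.map (fun x => (PySem.List.slice x (some left) (some i)).sum)).sum) →
    solveVA bands (PySem.List.pyRange i m 1) left n_each
      = solveVAlt bands (PySem.List.pyRange i m 1) run n_each := by
  induction n with
  | zero =>
    intro i left m run hn _ _ _
    rw [PySem.List.pyRange_one_eq_nil (by omega)]
    rfl
  | succ n ih =>
    intro i left m run hn hl hli hrun
    rw [PySem.List.pyRange_one_cons (by omega : i < m)]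
    have hrun' : (run.zip bands).map (fun p =>
        p.1 + (p.2.map (fun row => PySem.List.pyGetD row i 0)).sum)
        = bands.map (fun band =>
            (band.map (fun x => (PySem.List.slice x (some left) (some (i + 1))).sum)).sum) := by
      rw [hrun, zip_run bands
        (fun band => (band.map (fun x => (PySem.List.slice x (some left) (some i)).sum)).sum)
        (fun band => (band.map (fun row => PySem.List.pyGetD row i 0)).sum)]
      refine List.map_congr_left (fun band _ => ?_)
      rw [← PySem.List.sum_map_add_int]
      exact congrArg _ (List.map_congr_left (fun x _ => (rowIncr x left i hl hli).symm))
    simp only [solveVA, solveVAlt, hrun']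
    by_cases hall : (bands.map (fun band =>
        (band.map (fun x => (PySem.List.slice x (some left) (some (i + 1))).sum)).sum)).all
          (fun s => s == n_each) = true
    · simp only [hall, if_true]
      refine ih (i + 1) (i + 1) m _ (by omega) (by omega) (by omega) ?_
      have hsl : ∀ x : List Int, PySem.List.slice x (some (i + 1)) (some (i + 1)) = [] := by
        intro x
        rw [PySem.List.slice_toNat x (by omega) (by omega)]
        simp
      simp [hsl, List.map_const']
    · simp only [hall, if_false, Bool.false_eq_true]
      rcases hb : bands.map (fun band =>
        (band.map (fun x => (PySem.List.slice x (some left) (some (i + 1))).sum)).sum) with _ | ⟨s, t⟩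
      · rw [hb] at hall; simp at hall
      · rw [hb] at hall ⊢
        have hmax : ((PySem.List.max? (s :: t) (fun y => y)).getD 0 ≤ n_each)
            ↔ (∀ y ∈ s :: t, y ≤ n_each) := by
          rw [PySem.List.max?_id_cons, Option.getD_some]
          constructor
          · intro h y hy
            rcases List.mem_cons.mp hy with rfl | hy
            · exact le_trans (PySem.List.le_foldl_max t y).1 h
            · exact le_trans ((PySem.List.le_foldl_max t s).2 y hy) h
          · intro h
            rcases PySem.List.foldl_max_mem t s with h1 | h1
            · rw [h1]; exact h s List.mem_cons_self
            · exact h _ (List.mem_cons_of_mem _ h1)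
        by_cases hfor : ∀ y ∈ s :: t, y ≤ n_each
        · have hle : (PySem.List.max? (s :: t) (fun y => y)).getD 0 ≤ n_each := hmax.mpr hfor
          have hanyf : ((s :: t).any (fun r => n_each < r)) = false := by
            simp only [List.any_eq_false, decide_eq_true_eq]
            exact fun y hy => not_lt.mpr (hfor y hy)
          rw [if_pos hle, if_neg (by simp [hanyf])]
          rw [← hb]
          exact ih (i + 1) left m _ (by omega) hl (by omega) rfl
        · have hle : ¬ (PySem.List.max? (s :: t) (fun y => y)).getD 0 ≤ n_each :=
            fun h => hfor (hmax.mp h)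
          have hanyt : ((s :: t).any (fun r => n_each < r)) = true := by
            simp only [not_forall, not_le] at hfor
            obtain ⟨y, hy, hlt⟩ := hfor
            simp only [List.any_eq_true, decide_eq_true_eq]
            exact ⟨y, hy, hlt⟩
          rw [if_neg hle, if_pos (by simp [hanyt])]

-- ===== VERDICT (by name: the statement is the Claim_ definition above) =====
theorem solve_spec : Claim_equal_solve := by
  unfold Claim_equal_solve
  intro g h_ v _ _
  unfold Spec_solve solve solve_alt
  by_cases hmod : PySem.Int.mod ((g.map (fun x => x.sum)).sum) ((h_ + 1) * (v + 1)) ≠ 0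
  · rw [if_pos hmod, if_pos hmod]
  · rw [if_neg hmod, if_neg hmod]
    have H := hsim g [] [] 0
      (PySem.Int.floordiv ((g.map (fun x => x.sum)).sum) (h_ + 1)) [] rfl
    simp only [List.nil_append, List.length_nil, Nat.cast_zero] at H
    rw [show cutsAux (-1) [] = [-1] from rfl] at H
    rcases hA : solveHCutsA g 0 0
        (PySem.Int.floordiv ((g.map (fun x => x.sum)).sum) (h_ + 1)) [-1] with _ | cuts
    · rw [hA] at H
      simp only [Option.map_none] at H
      dsimp only
      rw [hA, ← H]
    · rw [hA] at H
      simp only [Option.map_some] at H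
      dsimp only
      rw [hA, ← H]
      refine vsim (((((PySem.List.pyGetD g 0 []).length : Int)) - 0).toNat)
        (solveBandsA g cuts) _ 0 0 _ _ rfl le_rfl le_rfl ?_
      have hsl0 : ∀ x : List Int, PySem.List.slice x (some 0) (some 0) = [] := by
        intro x
        rw [PySem.List.slice_toNat x le_rfl le_rfl]
        simp
      simp [hsl0, List.map_const']
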